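-- pv_equiv track=rewrite | github.com/jisun-choi/python_algorithm | 스코빌지수.py | solution
-- ===== SOURCE A (Python) =====
-- def solution(scovile, K):
--     answer = 0
--     while scovile:
--         answer += 1
--         min_s = min(scovile)
--         min_index = [i for i in range(len(scovile)) if scovile[i] == min_s][0]
--
--         del scovile[min_index]
--         min_second = min(scovile)
--         min_index = [i for i in range(len(scovile)) if scovile[i] == min_second][0]
--
--         del scovile[min_index]
--         manipulated = min_s + (min_second * 2)
--         scovile.append(manipulated)
--         is_ok = [i for i in scovile if i < K]
--         if len(is_ok) > 0:
--             continue
--         else: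
--             return answer
-- ===== SOURCE B (Python) =====
-- def solution(scovile, K):
--     s = sorted(scovile)
--     answer = 0
--     while True:
--         answer += 1
--         m = s[0] + 2 * s[1]
--         tail = s[2:]
--         pos = 0
--         n = len(tail)
--         while pos < n and tail[pos] < m:
--             pos += 1
--         tail.insert(pos, m)
--         s = tail
--         if s[0] >= K:
--             return answer
-- ===== Notes on version B (the rewrite author's own statement) =====
-- stated objective: faster
-- what changed: B sorts the list once and keeps it sorted (two smallest at the head, one ordered insertion per round) instead of A's per-round min scans, index-search comprehensions, deletes and a full all-below-K filter.
-- outside the precondition, e.g. on solution([], 0): A returns None, B raises IndexError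
import Mathlib
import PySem

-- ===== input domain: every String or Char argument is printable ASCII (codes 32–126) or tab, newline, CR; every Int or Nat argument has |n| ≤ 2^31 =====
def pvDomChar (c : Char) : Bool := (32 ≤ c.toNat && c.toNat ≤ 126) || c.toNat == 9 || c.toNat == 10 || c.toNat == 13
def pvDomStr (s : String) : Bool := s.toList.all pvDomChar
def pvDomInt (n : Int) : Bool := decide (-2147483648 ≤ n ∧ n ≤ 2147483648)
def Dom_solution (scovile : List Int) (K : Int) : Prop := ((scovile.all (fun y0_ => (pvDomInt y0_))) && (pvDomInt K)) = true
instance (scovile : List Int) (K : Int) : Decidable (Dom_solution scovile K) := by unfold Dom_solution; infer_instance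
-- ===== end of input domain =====

-- B sorts the list once and keeps it sorted (two smallest at the head, one ordered insertion
-- per round) instead of A's repeated min/index/delete/filter scans; same results. A mutates
-- its argument list in place, B does not: the equivalence proved is about the return value only.

-- ===== PORT A =====
-- fuel = scovile.length bounds the loop (the list shrinks by one per iteration); it is a
-- totality device only and never cuts a run short.
def solutionFuel : Nat → List Int → Int → Int → Int
  | 0, _, _, _ => 0
  | fuel+1, scovile, K, answer =>
    if scovile = [] then 0  -- while exits without returning: Python A returns None here (outside Pre_)
    else
      let answer := answer + 1
      match PySem.List.min? scovile (fun x => x) with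
      | none => 0  -- unreachable: scovile ≠ []
      | some min_s =>
        -- [i for i in range(len(scovile)) if scovile[i] == min_s][0] ; indices from range(len)
        -- are in range, so getD is exact; the list is nonempty (min_s ∈ scovile), so [0] is headD
        let min_index := ((List.range scovile.length).filter (fun i => scovile.getD i 0 == min_s)).headD 0
        let sc1 := scovile.eraseIdx min_index
        match PySem.List.min? sc1 (fun x => x) with
        | none => 0  -- Python: ValueError, min of empty list (outside Pre_)
        | some min_second =>
          let min_index2 := ((List.range sc1.length).filter (fun i => sc1.getD i 0 == min_second)).headD 0
          let sc2 := sc1.eraseIdx min_index2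
          let manipulated := min_s + min_second * 2
          let sc3 := sc2 ++ [manipulated]
          let is_ok := sc3.filter (fun i => decide (i < K))
          if is_ok.length > 0 then solutionFuel fuel sc3 K answer else answer

def solution (scovile : List Int) (K : Int) : Int :=
  solutionFuel scovile.length scovile K 0

-- ===== PORT B =====
-- the pos-scan ('while pos < n and tail[pos] < m: pos += 1') followed by tail.insert(pos, m)
def insertSortedLeft (m : Int) : List Int → List Int
  | [] => [m]
  | x :: xs => if x < m then x :: insertSortedLeft m xs else m :: x :: xs

-- fuel = length of s, a totality device as for A (the list shrinks by one per round)
def bLoop : Nat → List Int → Int → Int → Int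
  | 0, _, _, _ => 0
  | fuel+1, s, K, answer =>
    match s with
    | a :: b :: tail =>
      let answer := answer + 1
      let m := a + 2 * b
      let s' := insertSortedLeft m tail
      if K ≤ s'.headD 0 then answer else bLoop fuel s' K answer
    | _ => 0  -- Python: IndexError on s[0]/s[1] (outside Pre_)

def solution_alt (scovile : List Int) (K : Int) : Int :=
  bLoop scovile.length (PySem.List.sorted scovile (fun x => x) false) K 0

-- ===== PRECONDITION & SPEC =====
-- one round of the combining process on the multiset of values, tracked as a sorted list:
-- replace the two smallest a ≤ b by a + 2*b
def pvStep (s : List Int) : Option (List Int) :=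
  match PySem.List.sorted s (fun x => x) false with
  | a :: b :: t => some ((a + 2 * b) :: t)
  | _ => none

def pvIter : Nat → List Int → Option (List Int)
  | 0, s => some s
  | n+1, s => (pvStep s).bind (pvIter n)

def pvOk (scovile : List Int) (K : Int) (n : Nat) : Bool :=
  match pvIter (n + 1) scovile with
  | some s' => s'.all (fun x => decide (K ≤ x))
  | none => false

-- Pre_: the combine-two-smallest process reaches a state with every value ≥ K after some
-- positive number of rounds (at most len-1 rounds are possible). These are exactly the
-- inputs on which A returns: on [] A returns None (not an int), and when the process never
-- reaches an all-≥K state A raises ValueError (min of an empty list).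
def Pre_solution (scovile : List Int) (K : Int) : Prop :=
  ∃ n, n < scovile.length ∧ pvOk scovile K n = true
instance (scovile : List Int) (K : Int) : Decidable (Pre_solution scovile K) := by
  unfold Pre_solution; infer_instance

def pvWitness_solution : List Int × Int := ([1, 2, 3, 9, 10, 12], 7)

def Spec_solution (scovile : List Int) (K : Int) (out : Int) : Prop := out = solution_alt scovile K
instance (scovile : List Int) (K : Int) (out : Int) : Decidable (Spec_solution scovile K out) := by
  unfold Spec_solution; infer_instance

-- ===== CLAIM (what is proved, stated in full; the proofs are below) =====
def Claim_equal_solution : Prop := ∀ (scovile : List Int) (K : Int), Dom_solution scovile K → Pre_solution scovile K → Spec_solution scovile K (solution scovile K)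

-- ===== LEMMAS AND PROOFS =====

-- insertSortedLeft returns a permutation of m :: l
theorem insertSortedLeft_perm (m : Int) (l : List Int) : (insertSortedLeft m l).Perm (m :: l) := by
  induction l with
  | nil => simp [insertSortedLeft]
  | cons x xs ih =>
    simp only [insertSortedLeft]
    split
    · exact (ih.cons x).trans (List.Perm.swap m x xs)
    · exact List.Perm.refl _

theorem insertSortedLeft_sorted (m : Int) (l : List Int) (h : l.Pairwise (· ≤ ·)) :
    (insertSortedLeft m l).Pairwise (· ≤ ·) := by
  induction l with
  | nil => simp [insertSortedLeft]
  | cons x xs ih =>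
    simp only [insertSortedLeft]
    rcases List.pairwise_cons.mp h with ⟨hx, hxs⟩
    split
    · rename_i hlt
      refine List.pairwise_cons.mpr ⟨?_, ih hxs⟩
      intro b hb
      rcases List.mem_cons.mp ((insertSortedLeft_perm m xs).mem_iff.mp hb) with h1 | h1
      · exact h1 ▸ le_of_lt hlt
      · exact hx b h1
    · rename_i hnlt
      refine List.pairwise_cons.mpr ⟨?_, h⟩
      intro b hb
      rcases List.mem_cons.mp hb with h1 | h1
      · exact h1 ▸ le_of_not_gt hnlt
      · exact le_trans (le_of_not_gt hnlt) (hx b h1)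

theorem insertSortedLeft_ne_nil (m : Int) (l : List Int) : insertSortedLeft m l ≠ [] := by
  cases l with
  | nil => simp [insertSortedLeft]
  | cons x xs => simp only [insertSortedLeft]; split <;> simp

-- min? of any permutation of a sorted nonempty list is its head
theorem min?_of_perm_sorted (l : List Int) (a : Int) (t : List Int)
    (hp : l.Perm (a :: t)) (hs : (a :: t).Pairwise (· ≤ ·)) :
    PySem.List.min? l (fun x => x) = some a := by
  have hne : l ≠ [] := by
    intro h; subst h; exact (List.cons_ne_nil a t) hp.nil_eq.symm
  obtain ⟨m, hm⟩ : ∃ m, PySem.List.min? l (fun x => x) = some m := by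
    cases h : PySem.List.min? l (fun x => x) with
    | none => exact absurd ((PySem.List.min?_eq_none_iff l (fun x => x)).mp h) hne
    | some m => exact ⟨m, rfl⟩
  have hmem : m ∈ l := PySem.List.min?_mem hm
  have hmin : ∀ y ∈ l, m ≤ y := fun y hy => PySem.List.min?_isMin hm y hy
  have ha_mem : a ∈ l := hp.mem_iff.mpr List.mem_cons_self
  have h1 : m ≤ a := hmin a ha_mem
  have h2 : a ≤ m := by
    rcases List.mem_cons.mp (hp.mem_iff.mp hmem) with h | h
    · exact le_of_eq h.symm
    · exact (List.pairwise_cons.mp hs).1 m h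
  rw [hm, le_antisymm h1 h2]

-- the index list is nonempty when a ∈ l
theorem filter_range_ne_nil (l : List Int) (a : Int) (h : a ∈ l) :
    (List.range l.length).filter (fun i => l.getD i 0 == a) ≠ [] := by
  have hi : l.idxOf a < l.length := List.idxOf_lt_length_of_mem h
  have : l.idxOf a ∈ (List.range l.length).filter (fun i => l.getD i 0 == a) := by
    refine List.mem_filter.mpr ⟨List.mem_range.mpr hi, ?_⟩
    simp [hi, List.getElem_idxOf]
  exact List.ne_nil_of_mem this

-- deleting the FIRST index whose value equals a is erasing the first occurrence of a
theorem eraseIdx_first_eq_erase (l : List Int) (a : Int) (h : a ∈ l) :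
    l.eraseIdx (((List.range l.length).filter (fun i => l.getD i 0 == a)).headD 0) = l.erase a := by
  induction l with
  | nil => cases h
  | cons x xs ih =>
    by_cases hx : x = a
    · subst hx
      have h0 : ((List.range (x :: xs).length).filter (fun i => (x :: xs).getD i 0 == x)).headD 0 = 0 := by
        rw [List.length_cons, List.range_succ_eq_map]
        simp
      rw [h0, List.eraseIdx_cons_zero, List.erase_cons_head]
    · have hmem : a ∈ xs := by
        rcases List.mem_cons.mp h with h1 | h1
        · exact absurd h1.symm hx
        · exact h1
      have hfil : ((List.range (x :: xs).length).filter (fun i => (x :: xs).getD i 0 == a))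
          = ((List.range xs.length).filter (fun i => xs.getD i 0 == a)).map (· + 1) := by
        rw [List.length_cons, List.range_succ_eq_map, List.filter_cons]
        have hxa : ¬ ((x :: xs).getD 0 0 == a) = true := by simp [hx]
        rw [if_neg hxa, List.filter_map]
        rfl
      rw [hfil]
      obtain ⟨j, js, hj⟩ : ∃ j js, (List.range xs.length).filter (fun i => xs.getD i 0 == a) = j :: js := by
        cases hc : (List.range xs.length).filter (fun i => xs.getD i 0 == a) with
        | nil => exact absurd hc (filter_range_ne_nil xs a hmem)
        | cons j js => exact ⟨j, js, rfl⟩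
      rw [hj]
      simp only [List.map_cons, List.headD_cons, List.eraseIdx_cons_succ]
      rw [List.erase_cons_tail (by simpa using hx)]
      have hih := ih hmem
      rw [hj] at hih
      simp only [List.headD_cons] at hih
      rw [hih]

-- for a sorted nonempty list, 'some element < K' is 'head < K'
theorem exists_lt_iff_head_lt (s : List Int) (K : Int) (hs : s.Pairwise (· ≤ ·)) (hne : s ≠ []) :
    (∃ x ∈ s, x < K) ↔ ¬ (K ≤ s.headD 0) := by
  cases s with
  | nil => exact absurd rfl hne
  | cons y ys =>
    simp only [List.headD_cons, not_le]
    constructor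
    · rintro ⟨x, hx, hxK⟩
      rcases List.mem_cons.mp hx with h | h
      · exact h ▸ hxK
      · exact lt_of_le_of_lt ((List.pairwise_cons.mp hs).1 x h) hxK
    · intro h; exact ⟨y, List.mem_cons_self, h⟩

-- the main loop correspondence: A's loop on any list l equals B's loop on a sorted
-- rearrangement s of l, with the same fuel ≥ l.length
theorem loop_eq (fuel : Nat) : ∀ (l s : List Int) (K answer : Int),
    l.Perm s → s.Pairwise (· ≤ ·) → l.length ≤ fuel →
    solutionFuel fuel l K answer = bLoop fuel s K answer := by
  induction fuel with
  | zero => intro l s K answer _ _ _; rfl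
  | succ fuel ih =>
    intro l s K answer hp hs hlen
    cases s with
    | nil =>
      have : l = [] := hp.eq_nil
      subst this
      simp [solutionFuel, bLoop]
    | cons a s1 =>
      cases s1 with
      | nil =>
        have hl : l = [a] := List.perm_singleton.mp hp
        subst hl
        have h1 : PySem.List.min? [a] (fun x => x) = some a :=
          min?_of_perm_sorted [a] a [] (List.Perm.refl _) hs
        have h0 : PySem.List.min? ([] : List Int) (fun x : Int => x) = none :=
          (PySem.List.min?_eq_none_iff [] (fun x => x)).mpr rfl
        simp only [solutionFuel, bLoop, h1]
        norm_num [List.range_succ, List.filter_cons, h0]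
      | cons b t =>
        have hne : l ≠ [] := by
          intro h; subst h
          exact (List.cons_ne_nil a (b :: t)) hp.nil_eq.symm
        have hmin1 : PySem.List.min? l (fun x => x) = some a :=
          min?_of_perm_sorted l a (b :: t) hp hs
        have haMem : a ∈ l := hp.mem_iff.mpr List.mem_cons_self
        have hsc1 : l.eraseIdx (((List.range l.length).filter (fun i => l.getD i 0 == a)).headD 0)
            = l.erase a := eraseIdx_first_eq_erase l a haMem
        have hp1 : (l.erase a).Perm (b :: t) := by
          have h := hp.erase a
          rwa [List.erase_cons_head] at h
        have hs1 : (b :: t).Pairwise (· ≤ ·) := hs.tail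
        have hmin2 : PySem.List.min? (l.erase a) (fun x => x) = some b :=
          min?_of_perm_sorted (l.erase a) b t hp1 hs1
        have hbMem : b ∈ l.erase a := hp1.mem_iff.mpr List.mem_cons_self
        have hsc2 : (l.erase a).eraseIdx (((List.range (l.erase a).length).filter
            (fun i => (l.erase a).getD i 0 == b)).headD 0) = (l.erase a).erase b :=
          eraseIdx_first_eq_erase (l.erase a) b hbMem
        have hp2 : ((l.erase a).erase b).Perm t := by
          have h := hp1.erase b
          rwa [List.erase_cons_head] at h
        -- the next states are permutations of each other
        have hp3 : ((l.erase a).erase b ++ [a + b * 2]).Perm (insertSortedLeft (a + 2 * b) t) := by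
          have h1 : ((l.erase a).erase b ++ [a + b * 2]).Perm ((a + b * 2) :: t) :=
            (hp2.append (List.Perm.refl [a + b * 2])).trans (List.perm_append_singleton _ _)
          rw [show a + 2 * b = a + b * 2 from by ring]
          exact h1.trans (insertSortedLeft_perm (a + b * 2) t).symm
        have hs3 : (insertSortedLeft (a + 2 * b) t).Pairwise (· ≤ ·) :=
          insertSortedLeft_sorted _ _ hs1.tail
        have hne3 : insertSortedLeft (a + 2 * b) t ≠ [] := insertSortedLeft_ne_nil _ _
        -- the continue/return tests agree
        have htest : (((l.erase a).erase b ++ [a + b * 2]).filter (fun i => decide (i < K))).length > 0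
            ↔ ¬ (K ≤ (insertSortedLeft (a + 2 * b) t).headD 0) := by
          rw [← exists_lt_iff_head_lt _ K hs3 hne3]
          constructor
          · intro h
            obtain ⟨x, hx⟩ := List.exists_mem_of_length_pos h
            have hx' := List.mem_filter.mp hx
            exact ⟨x, hp3.mem_iff.mp hx'.1, by simpa using hx'.2⟩
          · rintro ⟨x, hx, hxK⟩
            exact List.length_pos_of_mem (List.mem_filter.mpr ⟨hp3.mem_iff.mpr hx, by simpa using hxK⟩)
        -- length fact for the recursive call
        have hlen3 : ((l.erase a).erase b ++ [a + b * 2]).length ≤ fuel := by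
          have he := hp3.length_eq
          rw [(insertSortedLeft_perm (a + 2 * b) t).length_eq] at he
          have hl : l.length = t.length + 2 := by rw [hp.length_eq]; rfl
          simp only [List.length_cons] at he
          omega
        -- unfold one round of both loops
        simp only [solutionFuel, bLoop, if_neg hne, hmin1, hsc1, hmin2, hsc2]
        by_cases hK : K ≤ (insertSortedLeft (a + 2 * b) t).headD 0
        · rw [if_neg (by rw [htest]; simpa using hK), if_pos hK]
        · rw [if_pos (htest.mpr hK), if_neg hK]
          exact ih _ _ K (answer + 1) hp3 hs3 hlen3

-- ===== VERDICT (by name: the statement is the Claim_ definition above) =====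
theorem solution_spec : Claim_equal_solution := by
  intro scovile K _ _
  unfold Spec_solution solution solution_alt
  refine loop_eq scovile.length scovile (PySem.List.sorted scovile (fun x => x) false) K 0
    (PySem.List.sorted_perm scovile (fun x => x) false).symm ?_ le_rfl
  exact PySem.List.sorted_pairwise scovile (fun x => x)
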